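-- pv_equiv track=rewrite | github.com/QvQ-Secret/FunnyMutPro | sequenceAlign.py | ssFill
-- ===== SOURCE A (Python) =====
-- def ssFill(ss: list, srcSeq) -> list:
--     dstSs = []
--     cnt = 0
--     for i in srcSeq:
--         if i != '-':
--             dstSs.append(ss[cnt])
--             cnt += 1
--         else:
--             dstSs.append('/')
--     return dstSs
-- ===== SOURCE B (Python) =====
-- def ssFill(ss: list, srcSeq) -> list:
--     chars = list(srcSeq)
--     dstSs = ['/'] * len(chars)
--     positions = [k for k, c in enumerate(chars) if c != '-']
--     for j, p in enumerate(positions):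
--         dstSs[p] = ss[j]
--     return dstSs
-- ===== Notes on version B (the rewrite author's own statement) =====
-- stated objective: alternative
-- what changed: Replaces the single counter-advancing interleave loop by a prefill-then-scatter: the output is prefilled with '/' at full length, the non-gap positions are collected once, and ss[j] is scattered onto the j-th non-gap position.
import Mathlib
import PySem

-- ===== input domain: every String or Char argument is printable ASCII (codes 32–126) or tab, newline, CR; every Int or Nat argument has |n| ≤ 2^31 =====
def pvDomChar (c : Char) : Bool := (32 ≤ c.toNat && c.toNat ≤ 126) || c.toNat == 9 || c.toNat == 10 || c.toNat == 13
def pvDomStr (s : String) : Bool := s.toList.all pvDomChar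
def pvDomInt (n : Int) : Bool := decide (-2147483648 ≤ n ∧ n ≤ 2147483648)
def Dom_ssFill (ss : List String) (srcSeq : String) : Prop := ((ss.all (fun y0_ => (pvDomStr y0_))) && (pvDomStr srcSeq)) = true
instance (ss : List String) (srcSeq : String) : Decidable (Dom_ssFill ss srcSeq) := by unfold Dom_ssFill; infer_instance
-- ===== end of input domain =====

-- B replaces A's counter-advancing interleave loop by prefill-with-'/' then scatter of ss onto
-- the collected non-gap positions (alternative decomposition, same cost).

-- ===== PORT A =====
-- literal port of A: append-accumulator loop over the characters with a counter into ss
def ssFill (ss : List String) (srcSeq : String) : List String :=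
  (srcSeq.toList.foldl
    (fun (st : List String × Int) i =>
      if i ≠ '-' then (st.1 ++ [PySem.List.pyGetD ss st.2 ""], st.2 + 1)
      else (st.1 ++ ["/"], st.2))
    (([] : List String), (0 : Int))).1

-- ===== PORT B =====
-- literal port of B: prefill with '/', collect non-gap positions, scatter ss[j] onto the j-th one
def ssFill_alt (ss : List String) (srcSeq : String) : List String :=
  let chars := srcSeq.toList
  let dstSs := List.replicate chars.length "/"
  let positions := ((PySem.List.enumerate chars 0).filter (fun kc => kc.2 ≠ '-')).map (·.1)
  (PySem.List.enumerate positions 0).foldl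
    (fun d jp => PySem.List.pySetD d jp.2 (PySem.List.pyGetD ss jp.1 "")) dstSs

-- ===== PRECONDITION & SPEC =====
-- Pre_ excludes exactly the inputs where Python A raises IndexError (fewer ss entries than
-- non-gap characters); Python B raises IndexError there too.
def Pre_ssFill (ss : List String) (srcSeq : String) : Prop :=
  srcSeq.toList.countP (fun c => c ≠ '-') ≤ ss.length
instance (ss : List String) (srcSeq : String) : Decidable (Pre_ssFill ss srcSeq) := by
  unfold Pre_ssFill; infer_instance
def pvWitness_ssFill : List String × String := (["H", "E"], "A-B")

def Spec_ssFill (ss : List String) (srcSeq : String) (out : List String) : Prop := out = ssFill_alt ss srcSeq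
instance (ss : List String) (srcSeq : String) (out : List String) : Decidable (Spec_ssFill ss srcSeq out) := by unfold Spec_ssFill; infer_instance

-- ===== CLAIM (what is proved, stated in full; the proofs are below) =====
def Claim_equal_ssFill : Prop := ∀ (ss : List String) (srcSeq : String), Dom_ssFill ss srcSeq → Pre_ssFill ss srcSeq → Spec_ssFill ss srcSeq (ssFill ss srcSeq)

-- ===== LEMMAS AND PROOFS =====

-- the non-gap positions of cs when enumeration starts at s (simp-normal predicate form)
def pvP (cs : List Char) (s : Int) : List Int :=
  ((PySem.List.enumerate cs s).filter (fun kc => !decide (kc.2 = '-'))).map (·.1)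

-- B's scatter loop, abstracted over the position list, the ss start index and the buffer
def pvScat (ss : List String) (ps : List Int) (t : Int) (d : List String) : List String :=
  (PySem.List.enumerate ps t).foldl
    (fun d jp => PySem.List.pySetD d jp.2 (PySem.List.pyGetD ss jp.1 "")) d

-- common reference function: the interleave written as plain structural recursion
def pvGo (ss : List String) : List Char → Int → List String
  | [], _ => []
  | c :: cs, k =>
      if c ≠ '-' then PySem.List.pyGetD ss k "" :: pvGo ss cs (k + 1)
      else "/" :: pvGo ss cs k

-- A's fold equals the reference interleave
theorem pvA_go (ss : List String) (cs : List Char) :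
    ∀ (acc : List String) (k : Int),
      (cs.foldl
        (fun (st : List String × Int) i =>
          if i ≠ '-' then (st.1 ++ [PySem.List.pyGetD ss st.2 ""], st.2 + 1)
          else (st.1 ++ ["/"], st.2)) (acc, k)).1 = acc ++ pvGo ss cs k := by
  induction cs with
  | nil => intro acc k; simp [pvGo]
  | cons c cs ih =>
      intro acc k
      simp only [List.foldl_cons]
      by_cases h : c = '-'
      · rw [if_neg (by simp [h]), ih]
        simp [pvGo, h, List.append_assoc]
      · rw [if_pos h, ih]
        simp [pvGo, h, List.append_assoc]

-- positions enumerated from s are the positions enumerated from 0, shifted by s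
theorem pvPos_shift (cs : List Char) : ∀ (s : Int), pvP cs s = (pvP cs 0).map (· + s) := by
  induction cs with
  | nil => intro s; simp [pvP, PySem.List.enumerate_nil]
  | cons c cs ih =>
      intro s
      by_cases h : c = '-'
      · simp only [pvP, PySem.List.enumerate_cons, List.filter_cons, h, decide_true,
          Bool.not_true, Bool.false_eq_true, if_false, zero_add]
        rw [show ((PySem.List.enumerate cs (s+1)).filter (fun kc => !decide (kc.2 = '-'))).map (·.1) = pvP cs (s+1) from rfl,
          show ((PySem.List.enumerate cs 1).filter (fun kc => !decide (kc.2 = '-'))).map (·.1) = pvP cs 1 from rfl,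
          ih (s+1), ih 1, List.map_map]
        exact List.map_congr_left (fun x _ => by simp [Function.comp_def]; ring)
      · simp only [pvP, PySem.List.enumerate_cons, List.filter_cons, h, decide_false,
          Bool.not_false, if_true, zero_add, List.map_cons]
        rw [show ((PySem.List.enumerate cs (s+1)).filter (fun kc => !decide (kc.2 = '-'))).map (·.1) = pvP cs (s+1) from rfl,
          show ((PySem.List.enumerate cs 1).filter (fun kc => !decide (kc.2 = '-'))).map (·.1) = pvP cs 1 from rfl,
          ih (s+1), ih 1, List.map_map]
        simp [Function.comp_def]
        exact fun a _ => by ring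

-- scattering onto positions all shifted by one, into a cons cell, peels off the head
theorem pvScatter_shift (ss : List String) (ps : List Int) (hps : ∀ p ∈ ps, 0 ≤ p) :
    ∀ (t : Int) (x : String) (d : List String),
      pvScat ss (ps.map (· + 1)) t (x :: d) = x :: pvScat ss ps t d := by
  induction ps with
  | nil => intro t x d; simp [pvScat, PySem.List.enumerate_nil]
  | cons p ps ih =>
      intro t x d
      have hp : 0 ≤ p := hps p (by simp)
      have hstep : PySem.List.pySetD (x :: d) (p + 1) (PySem.List.pyGetD ss t "")
          = x :: PySem.List.pySetD d p (PySem.List.pyGetD ss t "") := by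
        rw [PySem.List.pySetD_of_nonneg _ _ (by omega : (0:Int) ≤ p + 1),
          PySem.List.pySetD_of_nonneg _ _ hp]
        have h1 : (p + 1).toNat = p.toNat + 1 := by omega
        simp [h1]
      simp only [List.map_cons, pvScat, PySem.List.enumerate_cons, List.foldl_cons, hstep]
      exact ih (fun q hq => hps q (by simp [hq])) (t + 1) x _

-- every collected position is nonnegative
theorem pvPos_nonneg (cs : List Char) : ∀ p ∈ pvP cs 0, 0 ≤ p := by
  intro p hp
  simp only [pvP, List.mem_map, List.mem_filter] at hp
  obtain ⟨⟨i, c⟩, ⟨hm, _⟩, rfl⟩ := hp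
  rw [PySem.List.mem_enumerate_iff] at hm
  obtain ⟨k, hk, hEq⟩ := hm
  simp at hEq
  omega

-- B's scatter equals the reference interleave
theorem pvB_go (ss : List String) (cs : List Char) : ∀ (j : Int),
    pvScat ss (pvP cs 0) j (List.replicate cs.length "/") = pvGo ss cs j := by
  induction cs with
  | nil => intro j; simp [pvP, pvScat, PySem.List.enumerate_nil, pvGo]
  | cons c cs ih =>
      intro j
      by_cases h : c = '-'
      · have hP : pvP (c :: cs) 0 = (pvP cs 0).map (· + 1) := by
          simp only [pvP, PySem.List.enumerate_cons, List.filter_cons, h, decide_true,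
            Bool.not_true, Bool.false_eq_true, if_false, zero_add]
          exact pvPos_shift cs 1
        rw [hP]
        simp only [List.length_cons, List.replicate_succ]
        rw [pvScatter_shift ss _ (pvPos_nonneg cs) j "/"]
        simp only [pvGo, h, ne_eq, not_true_eq_false, if_false, ih j]
      · have hP : pvP (c :: cs) 0 = (0 : Int) :: (pvP cs 0).map (· + 1) := by
          simp only [pvP, PySem.List.enumerate_cons, List.filter_cons, h, decide_false,
            Bool.not_false, if_true, zero_add, List.map_cons]
          exact congrArg _ (pvPos_shift cs 1)
        rw [hP]
        simp only [List.length_cons, List.replicate_succ, pvScat, PySem.List.enumerate_cons,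
          List.foldl_cons]
        have hset : PySem.List.pySetD (("/" : String) :: List.replicate cs.length "/") (0 : Int)
            (PySem.List.pyGetD ss j "")
            = PySem.List.pyGetD ss j "" :: List.replicate cs.length "/" := by
          rw [PySem.List.pySetD_of_nonneg _ _ (le_refl (0:Int))]
          rfl
        rw [hset]
        rw [show ∀ l d, List.foldl (fun d jp => PySem.List.pySetD d jp.2 (PySem.List.pyGetD ss jp.1 "")) d (PySem.List.enumerate l (j+1)) = pvScat ss l (j+1) d from fun _ _ => rfl]
        rw [pvScatter_shift ss _ (pvPos_nonneg cs) (j + 1)]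
        simp only [pvGo, h, ne_eq, not_false_eq_true, if_true, ih (j + 1)]

-- the two ports written via the helpers
theorem pvA_eq (ss : List String) (srcSeq : String) :
    ssFill ss srcSeq = pvGo ss srcSeq.toList 0 := by
  unfold ssFill
  rw [pvA_go ss srcSeq.toList [] 0]
  simp

theorem pvB_eq (ss : List String) (srcSeq : String) :
    ssFill_alt ss srcSeq = pvScat ss (pvP srcSeq.toList 0) 0 (List.replicate srcSeq.toList.length "/") := by
  unfold ssFill_alt pvScat pvP
  simp only [ne_eq, decide_not]

-- ===== VERDICT (by name: the statement is the Claim_ definition above) =====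
theorem ssFill_spec : Claim_equal_ssFill := by
  intro ss srcSeq _ _
  show ssFill ss srcSeq = ssFill_alt ss srcSeq
  rw [pvA_eq, pvB_eq, pvB_go ss srcSeq.toList 0]
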